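-- pv_equiv track=rewrite | github.com/jcolinpatrick/kryptos | scripts/grille/e_mengen_grille_01_band_reading.py | find_t_band_boundaries
-- ===== SOURCE A (Python) =====
-- from typing import Dict, List, Optional, Tuple
--
-- TABLEAU_ROWS = [
--     " ABCDEFGHIJKLMNOPQRSTUVWXYZABCD",                # Row 1: header (31)
--     "AKRYPTOSABCDEFGHIJLMNQUVWXZKRYP",                # Row 2: A (31)
--     "BRYPTOSABCDEFGHIJLMNQUVWXZKRYPT",                # Row 3: B (31)
--     "CYPTOSABCDEFGHIJLMNQUVWXZKRYPTO",                # Row 4: C (31)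
--     "DPTOSABCDEFGHIJLMNQUVWXZKRYPTOS",                # Row 5: D (31)
--     "ETOSABCDEFGHIJLMNQUVWXZKRYPTOSA",                # Row 6: E (31)
--     "FOSABCDEFGHIJLMNQUVWXZKRYPTOSAB",                # Row 7: F (31)
--     "GSABCDEFGHIJLMNQUVWXZKRYPTOSABC",                # Row 8: G (31)
--     "HABCDEFGHIJLMNQUVWXZKRYPTOSABCD",                # Row 9: H (31)
--     "IBCDEFGHIJLMNQUVWXZKRYPTOSABCDE",                # Row 10: I (31)
--     "JCDEFGHIJLMNQUVWXZKRYPTOSABCDEF",                # Row 11: J (31)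
--     "KDEFGHIJLMNQUVWXZKRYPTOSABCDEFG",                # Row 12: K (31)
--     "LEFGHIJLMNQUVWXZKRYPTOSABCDEFGH",                # Row 13: L (31)
--     "MFGHIJLMNQUVWXZKRYPTOSABCDEFGHI",                # Row 14: M (31)
--     "NGHIJLMNQUVWXZKRYPTOSABCDEFGHIJL",               # Row 15: N (32) extra L
--     "OHIJLMNQUVWXZKRYPTOSABCDEFGHIJL",                # Row 16: O (31)
--     "PIJLMNQUVWXZKRYPTOSABCDEFGHIJLM",                # Row 17: P (31)
--     "QJLMNQUVWXZKRYPTOSABCDEFGHIJLMN",                # Row 18: Q (31)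
--     "RLMNQUVWXZKRYPTOSABCDEFGHIJLMNQ",                # Row 19: R (31)
--     "SMNQUVWXZKRYPTOSABCDEFGHIJLMNQU",                # Row 20: S (31)
--     "TNQUVWXZKRYPTOSABCDEFGHIJLMNQUV",                # Row 21: T (31)
--     "UQUVWXZKRYPTOSABCDEFGHIJLMNQUVW",                # Row 22: U (31)
--     "VUVWXZKRYPTOSABCDEFGHIJLMNQUVWXT",               # Row 23: V (32) extra T
--     "WVWXZKRYPTOSABCDEFGHIJLMNQUVWXZ",                # Row 24: W (31)
--     "XWXZKRYPTOSABCDEFGHIJLMNQUVWXZK",                # Row 25: X (31)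
--     "YXZKRYPTOSABCDEFGHIJLMNQUVWXZKR",                # Row 26: Y (31)
--     "ZZKRYPTOSABCDEFGHIJLMNQUVWXZKRY",                # Row 27: Z (31)
--     " ABCDEFGHIJKLMNOPQRSTUVWXYZABCD",                # Row 28: footer (31)
-- ]
--
-- def find_t_band_boundaries(t_cols: Dict[int, List[int]]) -> List[int]:
--     """Find rows where T-column position 'jumps' significantly → band boundaries.
--
--     Returns list of row indices where a new band starts.
--     """
--     # Use first T-col in each row (the "primary" T position)
--     primary_t = {}
--     for r in range(len(TABLEAU_ROWS)):
--         cols = t_cols.get(r, [])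
--         if cols:
--             primary_t[r] = cols[0]
--
--     # Find rows where the T-column jumps by more than 2 positions
--     boundaries = [0]  # First band always starts at row 0
--     rows_with_t = sorted(primary_t.keys())
--
--     for i in range(1, len(rows_with_t)):
--         prev_row = rows_with_t[i - 1]
--         curr_row = rows_with_t[i]
--         if abs(primary_t[curr_row] - primary_t[prev_row]) > 3:
--             boundaries.append(curr_row)
--
--     return boundaries
-- ===== SOURCE B (Python) =====
-- from typing import Dict, List
--
-- TABLEAU_ROWS = [
--     " ABCDEFGHIJKLMNOPQRSTUVWXYZABCD",
--     "AKRYPTOSABCDEFGHIJLMNQUVWXZKRYP",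
--     "BRYPTOSABCDEFGHIJLMNQUVWXZKRYPT",
--     "CYPTOSABCDEFGHIJLMNQUVWXZKRYPTO",
--     "DPTOSABCDEFGHIJLMNQUVWXZKRYPTOS",
--     "ETOSABCDEFGHIJLMNQUVWXZKRYPTOSA",
--     "FOSABCDEFGHIJLMNQUVWXZKRYPTOSAB",
--     "GSABCDEFGHIJLMNQUVWXZKRYPTOSABC",
--     "HABCDEFGHIJLMNQUVWXZKRYPTOSABCD",
--     "IBCDEFGHIJLMNQUVWXZKRYPTOSABCDE",
--     "JCDEFGHIJLMNQUVWXZKRYPTOSABCDEF",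
--     "KDEFGHIJLMNQUVWXZKRYPTOSABCDEFG",
--     "LEFGHIJLMNQUVWXZKRYPTOSABCDEFGH",
--     "MFGHIJLMNQUVWXZKRYPTOSABCDEFGHI",
--     "NGHIJLMNQUVWXZKRYPTOSABCDEFGHIJL",
--     "OHIJLMNQUVWXZKRYPTOSABCDEFGHIJL",
--     "PIJLMNQUVWXZKRYPTOSABCDEFGHIJLM",
--     "QJLMNQUVWXZKRYPTOSABCDEFGHIJLMN",
--     "RLMNQUVWXZKRYPTOSABCDEFGHIJLMNQ",
--     "SMNQUVWXZKRYPTOSABCDEFGHIJLMNQU",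
--     "TNQUVWXZKRYPTOSABCDEFGHIJLMNQUV",
--     "UQUVWXZKRYPTOSABCDEFGHIJLMNQUVW",
--     "VUVWXZKRYPTOSABCDEFGHIJLMNQUVWXT",
--     "WVWXZKRYPTOSABCDEFGHIJLMNQUVWXZ",
--     "XWXZKRYPTOSABCDEFGHIJLMNQUVWXZK",
--     "YXZKRYPTOSABCDEFGHIJLMNQUVWXZKR",
--     "ZZKRYPTOSABCDEFGHIJLMNQUVWXZKRY",
--     " ABCDEFGHIJKLMNOPQRSTUVWXYZABCD",
-- ]
--
-- def find_t_band_boundaries(t_cols: Dict[int, List[int]]) -> List[int]: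
--     """Single streaming pass: no intermediate dict, no sorting, no index loop."""
--     boundaries = [0]
--     prev = None
--     for r in range(len(TABLEAU_ROWS)):
--         cols = t_cols.get(r, [])
--         if cols:
--             if prev is not None and abs(cols[0] - prev) > 3:
--                 boundaries.append(r)
--             prev = cols[0]
--     return boundaries
-- ===== Notes on version B (the rewrite author's own statement) =====
-- stated objective: simpler
-- what changed: Replaced A's build-a-primary_t-dict, sort-its-keys, then index-loop-over-consecutive-keys pipeline by one streaming pass over the row range that tracks the previous primary T-column and appends a boundary on a jump > 3.
import Mathlib
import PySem

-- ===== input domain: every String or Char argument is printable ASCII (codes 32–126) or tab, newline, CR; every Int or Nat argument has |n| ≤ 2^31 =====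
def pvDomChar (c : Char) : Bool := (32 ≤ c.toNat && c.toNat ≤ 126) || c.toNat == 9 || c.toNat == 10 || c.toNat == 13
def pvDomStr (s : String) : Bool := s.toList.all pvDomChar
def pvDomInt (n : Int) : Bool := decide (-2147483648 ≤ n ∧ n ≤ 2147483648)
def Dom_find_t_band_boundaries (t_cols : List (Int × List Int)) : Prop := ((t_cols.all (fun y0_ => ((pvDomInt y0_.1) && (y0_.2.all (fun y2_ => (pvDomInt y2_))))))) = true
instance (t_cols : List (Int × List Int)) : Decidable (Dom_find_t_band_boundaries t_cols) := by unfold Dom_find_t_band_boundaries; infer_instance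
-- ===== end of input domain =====

-- B replaces A's dict-build + key-sort + index-loop pipeline by one streaming pass (objective: simpler).


-- ===== PORT A =====
-- len(TABLEAU_ROWS) = 28 (the module-level constant table has 28 rows)
def find_t_band_boundaries (t_cols : List (Int × List Int)) : List Int :=
  -- primary_t = {}; for r in range(len(TABLEAU_ROWS)): cols = t_cols.get(r, []); if cols: primary_t[r] = cols[0]
  let primary_t : PySem.Dict Int Int :=
    (PySem.List.pyRange 0 28 1).foldl
      (fun d r =>
        match PySem.Dict.getD (PySem.Dict.mk t_cols) r [] with
        | [] => d
        | c :: _ => d.insert r c)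
      PySem.Dict.empty
  -- rows_with_t = sorted(primary_t.keys())
  let rows_with_t := PySem.List.sorted primary_t.keys (fun x => x) false
  -- for i in range(1, len(rows_with_t)): … (indexing always in range, so pyGetD's default is never used;
  -- primary_t[row] always finds its key, so Dict.getD's default is never used)
  (PySem.List.pyRange 1 (rows_with_t.length : Int) 1).foldl
    (fun bs i =>
      let prev_row := PySem.List.pyGetD rows_with_t (i - 1) 0
      let curr_row := PySem.List.pyGetD rows_with_t i 0
      if 3 < |primary_t.getD curr_row 0 - primary_t.getD prev_row 0| then bs ++ [curr_row] else bs)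
    [0]

-- ===== PORT B =====
-- boundaries = [0]; prev = None; for r in range(28): cols = t_cols.get(r, []); if cols: …
def find_t_band_boundaries_alt (t_cols : List (Int × List Int)) : List Int :=
  ((PySem.List.pyRange 0 28 1).foldl
    (fun (st : List Int × Option Int) r =>
      match PySem.Dict.getD (PySem.Dict.mk t_cols) r [] with
      | [] => st
      | c :: _ =>
        match st.2 with
        | none => (st.1, some c)
        | some p => (if 3 < |c - p| then st.1 ++ [r] else st.1, some c))
    ([0], (none : Option Int))).1

-- ===== PRECONDITION & SPEC =====
def Spec_find_t_band_boundaries (t_cols : List (Int × List Int)) (out : List Int) : Prop := out = find_t_band_boundaries_alt t_cols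
instance (t_cols : List (Int × List Int)) (out : List Int) : Decidable (Spec_find_t_band_boundaries t_cols out) := by unfold Spec_find_t_band_boundaries; infer_instance

-- ===== CLAIM (what is proved, stated in full; the proofs are below) =====
def Claim_equal_find_t_band_boundaries : Prop := ∀ (t_cols : List (Int × List Int)), Dom_find_t_band_boundaries t_cols → Spec_find_t_band_boundaries t_cols (find_t_band_boundaries t_cols)

-- ===== LEMMAS AND PROOFS =====

-- the per-row extraction both programs perform: first T-column of row r, if any
def pvF (t_cols : List (Int × List Int)) (r : Int) : Option (Int × Int) :=
  match PySem.Dict.getD (PySem.Dict.mk t_cols) r [] with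
  | [] => none
  | c :: _ => some (r, c)

-- the (row, primary T-col) pairs, in row order
def pvPairs (t_cols : List (Int × List Int)) : List (Int × Int) :=
  (PySem.List.pyRange 0 28 1).filterMap (pvF t_cols)

-- B's step on an extracted pair
def pvStreamStep (st : List Int × Option Int) (p : Int × Int) : List Int × Option Int :=
  match st.2 with
  | none => (st.1, some p.2)
  | some q => (if 3 < |p.2 - q| then st.1 ++ [p.1] else st.1, some p.2)

-- boundaries contributed after a pair with primary column `prev`
def pvAdj (prev : Int) : List (Int × Int) → List Int
  | [] => []
  | p :: t => (if 3 < |p.2 - prev| then [p.1] else []) ++ pvAdj p.2 t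

-- A's inner-loop step, with lookups resolved to positions in pvPairs
def pvIdxStep (P : List (Int × Int)) (bs : List Int) (i : Int) : List Int :=
  if 3 < |(P.getD i.toNat (0, 0)).2 - (P.getD (i - 1).toNat (0, 0)).2|
  then bs ++ [(P.getD i.toNat (0, 0)).1] else bs

theorem pvPairs_fst_sublist (t_cols : List (Int × List Int)) (rs : List Int) :
    ((rs.filterMap (pvF t_cols)).map Prod.fst).Sublist rs := by
  induction rs with
  | nil => simp
  | cons r rs ih =>
    simp only [List.filterMap_cons, pvF]
    cases h : PySem.Dict.getD (PySem.Dict.mk t_cols) r [] with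
    | nil => exact ih.cons r
    | cons c cs => simpa using ih.cons₂ r

theorem pvPairs_fst_pairwise (t_cols : List (Int × List Int)) :
    ((pvPairs t_cols).map Prod.fst).Pairwise (· < ·) :=
  (PySem.List.pairwise_lt_pyRange_one 0 28).sublist (pvPairs_fst_sublist t_cols _)

theorem alt_eq_stream (t_cols : List (Int × List Int)) :
    find_t_band_boundaries_alt t_cols
      = ((pvPairs t_cols).foldl pvStreamStep ([0], none)).1 := by
  unfold find_t_band_boundaries_alt pvPairs
  rw [List.foldl_filterMap]
  congr 1
  apply PySem.List.foldl_congr_mem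
  intro acc r _
  simp only [pvF]
  cases PySem.Dict.getD (PySem.Dict.mk t_cols) r [] <;> rfl

theorem stream_some (P : List (Int × Int)) : ∀ (bs : List Int) (prev : Int),
    (P.foldl pvStreamStep (bs, some prev)).1 = bs ++ pvAdj prev P := by
  induction P with
  | nil => intro bs prev; simp [pvAdj]
  | cons p t ih =>
    intro bs prev
    simp only [List.foldl_cons, pvStreamStep, pvAdj]
    split_ifs with h <;> simp [ih]

theorem stream_none (P : List (Int × Int)) :
    (P.foldl pvStreamStep ([0], none)).1
      = [0] ++ (match P with | [] => [] | q :: t => pvAdj q.2 t) := by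
  cases P with
  | nil => rfl
  | cons q t => simpa [pvStreamStep] using stream_some t [0] q.2

theorem primary_items (t_cols : List (Int × List Int)) :
    ((PySem.List.pyRange 0 28 1).foldl
      (fun d r =>
        match PySem.Dict.getD (PySem.Dict.mk t_cols) r [] with
        | [] => d
        | c :: _ => d.insert r c)
      PySem.Dict.empty).items = pvPairs t_cols := by
  have h1 : (PySem.List.pyRange 0 28 1).foldl
      (fun d r =>
        match PySem.Dict.getD (PySem.Dict.mk t_cols) r [] with
        | [] => d
        | c :: _ => d.insert r c)
      PySem.Dict.empty
      = (pvPairs t_cols).foldl (fun d p => d.insert p.1 p.2) PySem.Dict.empty := by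
    unfold pvPairs
    rw [List.foldl_filterMap]
    apply (PySem.List.foldl_congr_mem _ _ _ _ _).symm
    intro acc r _
    simp only [pvF]
    cases PySem.Dict.getD (PySem.Dict.mk t_cols) r [] <;> rfl
  rw [h1]
  have := PySem.Dict.items_foldl_insert_fresh (pvPairs t_cols) Prod.fst Prod.snd
      PySem.Dict.empty (by intro a _; simp [PySem.Dict.contains_empty])
      ((pvPairs_fst_pairwise t_cols).nodup)
  simpa using this

theorem idx_loop_shift (t : List (Int × Int)) : ∀ (q : Int × Int) (bs : List Int),
    (List.range t.length).foldl (fun bs (k : Nat) => pvIdxStep (q :: t) bs (1 + (k : Int))) bs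
      = bs ++ pvAdj q.2 t := by
  induction t with
  | nil => intro q bs; simp [pvAdj]
  | cons p t ih =>
    intro q bs
    rw [List.length_cons, List.range_succ_eq_map, List.foldl_cons, List.foldl_map]
    have h0 : pvIdxStep (q :: p :: t) bs (1 + (0 : Nat)) =
        bs ++ (if 3 < |p.2 - q.2| then [p.1] else []) := by
      simp only [pvIdxStep]
      norm_num
      split_ifs <;> simp
    have hbody : ∀ (bs' : List Int) (k : Nat),
        pvIdxStep (q :: p :: t) bs' (1 + ((k + 1 : Nat) : Int))
          = pvIdxStep (p :: t) bs' (1 + (k : Int)) := by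
      intro bs' k
      simp only [pvIdxStep]
      have e1 : ((1 + ((k + 1 : Nat) : Int))).toNat = k + 2 := by omega
      have e2 : ((1 + ((k + 1 : Nat) : Int)) - 1).toNat = k + 1 := by omega
      have e3 : ((1 + (k : Nat) : Int)).toNat = k + 1 := by omega
      have e4 : ((1 + (k : Nat) : Int) - 1).toNat = k := by omega
      rw [e1, e2, e3, e4]
      simp
    rw [h0]
    calc (List.range t.length).foldl
          (fun bs' (k : Nat) => pvIdxStep (q :: p :: t) bs' (1 + ((k + 1 : Nat) : Int)))
          (bs ++ (if 3 < |p.2 - q.2| then [p.1] else []))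
        = (List.range t.length).foldl (fun bs' (k : Nat) => pvIdxStep (p :: t) bs' (1 + (k : Int)))
          (bs ++ (if 3 < |p.2 - q.2| then [p.1] else [])) := by
          apply PySem.List.foldl_congr_mem
          intro acc k _
          exact hbody acc k
      _ = bs ++ (if 3 < |p.2 - q.2| then [p.1] else []) ++ pvAdj p.2 t := ih p _
      _ = bs ++ pvAdj q.2 (p :: t) := by simp [pvAdj]

theorem idx_loop (P : List (Int × Int)) :
    (PySem.List.pyRange 1 (P.length : Int) 1).foldl (pvIdxStep P) [0]
      = [0] ++ (match P with | [] => [] | q :: t => pvAdj q.2 t) := by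
  cases P with
  | nil => rfl
  | cons q t =>
    rw [PySem.List.pyRange_one, List.foldl_map]
    have hn : (((q :: t).length : Int) - 1).toNat = t.length := by
      simp [List.length_cons]
    rw [hn]
    simpa using idx_loop_shift t q [0]

-- ===== VERDICT (by name: the statement is the Claim_ definition above) =====
theorem find_t_band_boundaries_spec : Claim_equal_find_t_band_boundaries := by
  intro t_cols _
  unfold Spec_find_t_band_boundaries
  rw [alt_eq_stream, stream_none]
  simp only [find_t_band_boundaries]
  set D := (PySem.List.pyRange 0 28 1).foldl
      (fun d r =>
        match PySem.Dict.getD (PySem.Dict.mk t_cols) r [] with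
        | [] => d
        | c :: _ => d.insert r c)
      PySem.Dict.empty with hD
  have hitems : D.items = pvPairs t_cols := primary_items t_cols
  have hkeys : D.keys = (pvPairs t_cols).map Prod.fst := by
    simp only [PySem.Dict.keys, hitems]
  have hnodup : D.keys.Nodup := by rw [hkeys]; exact (pvPairs_fst_pairwise t_cols).nodup
  have hsorted : PySem.List.sorted D.keys (fun x => x) false = (pvPairs t_cols).map Prod.fst := by
    rw [hkeys]
    exact PySem.List.sorted_eq_of_perm_of_pairwise_lt _ _ _ (List.Perm.refl _)
      (pvPairs_fst_pairwise t_cols)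
  rw [hsorted]
  set P := pvPairs t_cols with hP
  have hlen : (P.map Prod.fst).length = P.length := by simp
  rw [hlen]
  have hbody : ∀ (bs : List Int), ∀ i ∈ PySem.List.pyRange 1 (P.length : Int) 1,
      (fun bs i =>
        let prev_row := PySem.List.pyGetD (P.map Prod.fst) (i - 1) 0
        let curr_row := PySem.List.pyGetD (P.map Prod.fst) i 0
        if 3 < |D.getD curr_row 0 - D.getD prev_row 0| then bs ++ [curr_row] else bs) bs i
        = pvIdxStep P bs i := by
    intro bs i hi
    have hmem := (PySem.List.mem_pyRange_one).1 hi
    have h1i : 1 ≤ i := hmem.1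
    have hilt : i < (P.length : Int) := hmem.2
    have hiN : i.toNat < P.length := by omega
    have hi1N : (i - 1).toNat < P.length := by omega
    have hget : ∀ (j : Int), 0 ≤ j → j.toNat < P.length →
        PySem.List.pyGetD (P.map Prod.fst) j 0 = (P.getD j.toNat (0, 0)).1 := by
      intro j hj hjl
      rw [PySem.List.pyGetD_of_nonneg _ _ hj]
      rw [List.getD_eq_getElem _ _ (by simpa using hjl), List.getD_eq_getElem _ _ hjl]
      simp
    have hcur := hget i (by omega) hiN
    have hprev := hget (i - 1) (by omega) hi1N
    simp only [hcur, hprev]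
    have hval : ∀ (j : Nat), j < P.length → D.getD (P.getD j (0, 0)).1 0 = (P.getD j (0, 0)).2 := by
      intro j hj
      rw [List.getD_eq_getElem _ _ hj]
      have hmem' : P[j] ∈ P := List.getElem_mem hj
      have : (P[j].1, P[j].2) ∈ D.items := by rw [hitems]; simp [hmem']
      exact PySem.Dict.getD_of_mem_items D this hnodup 0
    rw [hval i.toNat hiN, hval (i - 1).toNat hi1N]
    rfl
  rw [PySem.List.foldl_congr_mem _ _ (pvIdxStep P) [0] hbody]
  rw [idx_loop]
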